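-- pv_equiv track=rewrite | github.com/ChanggiJeon/algo_study | 23.01.16~01.27/hja/풍선터트리기.py | solution
-- ===== SOURCE A (Python) =====
-- def solution(a):
--     answer = 0
--     if len(a) <= 2:
--         return len(a)
--     else:
--         start = a[0]
--         end = a[-1]
--         for i in range(1, len(a)-1):
--             if start > a[i]:
--                 answer += 1
--                 start = a[i]
--             if end > a[-1-i]:
--                 answer += 1
--                 end = a[-1-i]
--         if start != end:  ## 짝수
--             return answer + 2
--         else: ## 홀수
--             return answer + 1
-- ===== SOURCE B (Python) =====
-- def solution(a):
--     n = len(a)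
--     if n <= 2:
--         return n
--     pre = []
--     for x in a:
--         pre.append(x if not pre or x < pre[-1] else pre[-1])
--     rpre = []
--     for x in reversed(a):
--         rpre.append(x if not rpre or x < rpre[-1] else rpre[-1])
--     suf = rpre[::-1]
--     left = sum(1 for i in range(1, n - 1) if pre[i] < pre[i - 1])
--     right = sum(1 for i in range(1, n - 1) if suf[i] < suf[i + 1])
--     return left + right + (2 if pre[n - 2] != suf[1] else 1)
-- ===== Notes on version B (the rewrite author's own statement) =====
-- stated objective: alternative
-- what changed: A walks both ends simultaneously with one index loop carrying two running minima; B first builds explicit prefix- and suffix-running-minimum tables and then counts strict drops by scanning each table separately, with the endpoint term read off the tables.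
import Mathlib
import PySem

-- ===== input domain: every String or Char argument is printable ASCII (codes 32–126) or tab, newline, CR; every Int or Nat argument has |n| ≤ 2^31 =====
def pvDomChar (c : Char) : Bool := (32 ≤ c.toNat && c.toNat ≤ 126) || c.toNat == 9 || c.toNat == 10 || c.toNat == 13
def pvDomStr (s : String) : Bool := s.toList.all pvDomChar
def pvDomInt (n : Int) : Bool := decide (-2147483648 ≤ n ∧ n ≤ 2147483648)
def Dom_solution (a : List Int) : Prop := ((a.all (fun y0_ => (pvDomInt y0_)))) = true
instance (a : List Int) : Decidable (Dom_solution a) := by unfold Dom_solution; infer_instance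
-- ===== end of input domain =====

-- B replaces A's simultaneous two-pointer walk by explicit prefix/suffix running-minimum
-- tables scanned separately (alternative decomposition, same O(n) cost).

-- shared indexing helper: xs[i]; every use below is at an in-range index (the code runs
-- only when len(a) >= 3), so the .getD default never fires and the port is exact.
def pyAt (l : List Int) (i : Int) : Int := (PySem.List.pyGet? l i).getD 0

-- ===== PORT A =====
def solution (a : List Int) : Int :=
  if a.length ≤ 2 then (a.length : Int)
  else
    let start := pyAt a 0
    let endv  := pyAt a (-1)
    let st := (PySem.List.pyRange 1 ((a.length : Int) - 1) 1).foldl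
      (fun (s : Int × Int × Int) i =>
        let s1 := if s.2.1 > pyAt a i then (s.1 + 1, pyAt a i, s.2.2) else s
        if s1.2.2 > pyAt a (-1 - i) then (s1.1 + 1, s1.2.1, pyAt a (-1 - i)) else s1)
      (0, start, endv)
    if st.2.1 ≠ st.2.2 then st.1 + 2 else st.1 + 1

-- ===== PORT B =====
-- running-minimum table: out.append(x if not out or x < out[-1] else out[-1])
def preMins (a : List Int) : List Int :=
  a.foldl (fun out x =>
    out ++ [match out.getLast? with
            | none => x
            | some m => if x < m then x else m]) []

def solution_alt (a : List Int) : Int :=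
  if a.length ≤ 2 then (a.length : Int)
  else
    let n : Int := a.length
    let pre := preMins a
    let suf := (preMins a.reverse).reverse
    let left := (PySem.List.pyRange 1 (n - 1) 1).foldl
      (fun c i => c + (if pyAt pre i < pyAt pre (i - 1) then 1 else 0)) 0
    let right := (PySem.List.pyRange 1 (n - 1) 1).foldl
      (fun c i => c + (if pyAt suf i < pyAt suf (i + 1) then 1 else 0)) 0
    left + right + (if pyAt pre (n - 2) ≠ pyAt suf 1 then 2 else 1)

-- ===== PRECONDITION & SPEC =====
def Spec_solution (a : List Int) (out : Int) : Prop := out = solution_alt a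
instance (a : List Int) (out : Int) : Decidable (Spec_solution a out) := by unfold Spec_solution; infer_instance

-- ===== CLAIM (what is proved, stated in full; the proofs are below) =====
def Claim_equal_solution : Prop := ∀ (a : List Int), Dom_solution a → Spec_solution a (solution a)

-- ===== LEMMAS AND PROOFS =====

-- abstract descriptions of both loops
def runMin (m : Int) (l : List Int) : Int := l.foldl min m

def dropCount (m : Int) : List Int → Int
  | [] => 0
  | x :: xs => (if x < m then 1 else 0) + dropCount (min x m) xs

def pmAux (m : Int) : List Int → List Int
  | [] => []
  | x :: xs => (if x < m then x else m) :: pmAux (if x < m then x else m) xs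

theorem if_lt_eq_min (x m : Int) : (if x < m then x else m) = min x m := by
  rw [min_def]; split_ifs <;> omega

theorem runMin_nil (m : Int) : runMin m [] = m := rfl

theorem runMin_cons (m y : Int) (t : List Int) : runMin m (y :: t) = runMin (min m y) t := rfl

theorem runMin_append (m : Int) (l : List Int) (z : Int) :
    runMin m (l ++ [z]) = min (runMin m l) z := by
  unfold runMin; rw [List.foldl_append]; rfl

theorem dropCount_append (m : Int) (l : List Int) (z : Int) :
    dropCount m (l ++ [z]) = dropCount m l + (if z < runMin m l then 1 else 0) := by
  induction l generalizing m with
  | nil => simp [dropCount, runMin_nil]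
  | cons x t ih =>
      simp only [List.cons_append, dropCount, ih, runMin_cons]
      have hc : min m x = min x m := min_comm m x
      simp only [hc]
      ring

theorem preMins_go (xs : List Int) : ∀ (out : List Int) (m : Int), out.getLast? = some m →
    xs.foldl (fun out x =>
      out ++ [match out.getLast? with
              | none => x
              | some m => if x < m then x else m]) out = out ++ pmAux m xs := by
  induction xs with
  | nil => intro out m _; simp [pmAux]
  | cons x t ih =>
      intro out m hm
      simp only [List.foldl_cons, hm]
      rw [ih (out ++ [if x < m then x else m]) (if x < m then x else m) (by simp)]
      simp [pmAux]

theorem preMins_cons (x : Int) (xs : List Int) : preMins (x :: xs) = x :: pmAux x xs := by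
  unfold preMins
  simp only [List.foldl_cons]
  have := preMins_go xs [x] x (by simp)
  simpa using this

theorem pmIdx (xs : List Int) : ∀ (x : Int) (k : Nat), k ≤ xs.length →
    (x :: pmAux x xs)[k]? = some (runMin x (xs.take k)) := by
  induction xs with
  | nil =>
      intro x k hk
      have : k = 0 := by simpa using hk
      subst this
      simp [pmAux, runMin_nil]
  | cons y t ih =>
      intro x k hk
      cases k with
      | zero => simp [runMin_nil]
      | succ j =>
          simp only [pmAux, List.getElem?_cons_succ, List.take_succ_cons, runMin_cons]
          have := ih (if y < x then y else x) j (by simpa using hk)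
          simpa [if_lt_eq_min, min_comm x y] using this

theorem pmAux_length (m : Int) (l : List Int) : (pmAux m l).length = l.length := by
  induction l generalizing m with
  | nil => rfl
  | cons x t ih => simp [pmAux, ih]

theorem pyAt_nat (l : List Int) (j : Nat) : pyAt l (j : Int) = (l[j]?).getD 0 := by
  simp [pyAt]

theorem pyAt_reverse (l : List Int) (i : Int) (h0 : 0 ≤ i) (h : i < l.length) :
    pyAt l.reverse i = pyAt l ((l.length : Int) - 1 - i) := by
  obtain ⟨j, rfl⟩ : ∃ j : Nat, i = (j : Int) := ⟨i.toNat, (Int.toNat_of_nonneg h0).symm⟩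
  have hj : j < l.length := by exact_mod_cast h
  have h2 : ((l.length : Int) - 1 - (j : Int)) = ((l.length - 1 - j : Nat) : Int) := by omega
  rw [show pyAt l.reverse (j:Int) = ((l.reverse)[j]?).getD 0 from pyAt_nat _ j, h2, pyAt_nat,
    List.getElem?_reverse (by simpa using hj)]

theorem pyAt_negIdx (l : List Int) (i : Int) (h0 : 0 ≤ i) (h : i < l.length) :
    pyAt l (-1 - i) = pyAt l.reverse i := by
  obtain ⟨j, rfl⟩ : ∃ j : Nat, i = (j : Int) := ⟨i.toNat, (Int.toNat_of_nonneg h0).symm⟩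
  have hj : j < l.length := by exact_mod_cast h
  have h1 : (-1 - (j : Int)) = -(((j + 1 : Nat)) : Int) := by push_cast; ring
  rw [pyAt, h1, PySem.List.pyGet?_neg_natCast l (j + 1) (by omega) (by omega)]
  rw [show pyAt l.reverse (j:Int) = ((l.reverse)[j]?).getD 0 from pyAt_nat _ j,
    List.getElem?_reverse (by simpa using hj)]
  have : l.length - (j + 1) = l.length - 1 - j := by omega
  rw [this]

theorem foldA_eq (F G : Int → Int) (l : List Int) : ∀ c s e : Int,
    l.foldl (fun (st : Int × Int × Int) i =>
      if (if F i < st.2.1 then (st.1 + 1, F i, st.2.2) else st).2.2 > G i then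
        ((if F i < st.2.1 then (st.1 + 1, F i, st.2.2) else st).1 + 1,
         (if F i < st.2.1 then (st.1 + 1, F i, st.2.2) else st).2.1, G i)
      else (if F i < st.2.1 then (st.1 + 1, F i, st.2.2) else st)) (c, s, e)
    = (c + dropCount s (l.map F) + dropCount e (l.map G),
       runMin s (l.map F), runMin e (l.map G)) := by
  induction l with
  | nil => intro c s e; simp [dropCount, runMin_nil]
  | cons i t ih =>
      intro c s e
      simp only [List.foldl_cons, List.map_cons, dropCount, runMin_cons]
      by_cases h1 : F i < s <;> by_cases h2 : G i < e
      · simp only [gt_iff_lt, h1, h2, if_true]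
        rw [ih]
        simp [min_eq_left h1.le, min_eq_right h1.le, min_eq_left h2.le, min_eq_right h2.le]
        ring
      · simp only [gt_iff_lt, h1, h2, if_true, if_false]
        rw [ih]
        simp [min_eq_left h1.le, min_eq_right h1.le,
          min_eq_right (not_lt.mp h2), min_eq_left (not_lt.mp h2)]
        ring
      · simp only [gt_iff_lt, h1, h2, if_true, if_false]
        rw [ih]
        simp [min_eq_right (not_lt.mp h1), min_eq_left (not_lt.mp h1),
          min_eq_left h2.le, min_eq_right h2.le]
        ring
      · simp only [gt_iff_lt, h1, h2, if_false]
        rw [ih]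
        simp [min_eq_right (not_lt.mp h1), min_eq_left (not_lt.mp h1),
          min_eq_right (not_lt.mp h2), min_eq_left (not_lt.mp h2)]

theorem countFold (x : Int) (xs : List Int) (k : Nat) (hk : k ≤ xs.length) :
    (PySem.List.pyRange 1 (1 + (k : Int)) 1).foldl
      (fun c i => c + (if pyAt (x :: pmAux x xs) i < pyAt (x :: pmAux x xs) (i - 1) then 1 else 0)) 0
    = dropCount x (xs.take k) := by
  induction k with
  | zero => simp [PySem.List.pyRange_one_eq_nil, dropCount]
  | succ k ih =>
      have hb : (1 : Int) + ((k + 1 : Nat) : Int) = (1 + (k : Int)) + 1 := by push_cast; ring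
      rw [hb, PySem.List.pyRange_one_succ_right (by omega), List.foldl_append,
        ih (by omega), List.foldl_cons, List.foldl_nil]
      have hklen : k < xs.length := by omega
      have hA : pyAt (x :: pmAux x xs) (1 + (k : Int)) = runMin x (xs.take (k + 1)) := by
        have h1 : (1 + (k : Int)) = ((k + 1 : Nat) : Int) := by push_cast; ring
        rw [h1, pyAt_nat, pmIdx xs x (k + 1) (by omega)]; rfl
      have hB : pyAt (x :: pmAux x xs) (1 + (k : Int) - 1) = runMin x (xs.take k) := by
        have h1 : (1 + (k : Int) - 1) = ((k : Nat) : Int) := by ring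
        rw [h1, pyAt_nat, pmIdx xs x k (by omega)]; rfl
      rw [hA, hB]
      have ht : xs.take (k + 1) = xs.take k ++ [xs[k]] := by
        rw [List.take_add_one]; simp [hklen]
      rw [ht, dropCount_append, runMin_append]
      have hiff : (min (runMin x (xs.take k)) xs[k] < runMin x (xs.take k)) ↔
          (xs[k] < runMin x (xs.take k)) := by omega
      rw [if_congr hiff rfl rfl]

theorem list_sum_range_eq (F : Nat → Int) (N : Nat) :
    ((List.range N).map F).sum = ∑ i ∈ Finset.range N, F i := by
  induction N with
  | zero => simp
  | succ n ih => rw [List.range_succ]; simp [ih, Finset.sum_range_succ]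

theorem sum_reflect (F G : Nat → Int) (N : Nat) (h : ∀ k, k < N → F k = G (N - 1 - k)) :
    ((List.range N).map F).sum = ((List.range N).map G).sum := by
  rw [list_sum_range_eq, list_sum_range_eq, ← Finset.sum_range_reflect G N]
  exact Finset.sum_congr rfl (fun k hk => h k (Finset.mem_range.mp hk))

theorem dropLast_cons_drop_one (z : Int) (l : List Int) (m : Nat) (hm : l.length = m + 1) :
    (z :: l).dropLast.drop 1 = l.dropLast := by
  rw [List.dropLast_eq_take, List.dropLast_eq_take]
  simp [hm, List.take_succ_cons]

theorem solution_eq_alt (a : List Int) (h3 : 3 ≤ a.length) : solution a = solution_alt a := by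
  cases a with
  | nil => simp at h3
  | cons x xs =>
  obtain ⟨y, ys, hrev⟩ := List.exists_cons_of_ne_nil (l := (x :: xs).reverse) (by simp)
  have hlen : ys.length = xs.length := by
    have := congrArg List.length hrev; simpa using this.symm
  have hxs2 : 2 ≤ xs.length := by simpa using h3
  simp only [solution, solution_alt]
  have hg : ¬ ((x :: xs).length ≤ 2) := by simp only [List.length_cons]; omega
  rw [if_neg hg, if_neg hg]
  set N : Int := (((x :: xs).length : Nat) : Int) with hN
  have hNval : N = (xs.length : Int) + 1 := by rw [hN, List.length_cons]; push_cast; ring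
  -- starting values
  have hstart : pyAt (x :: xs) 0 = x := by
    simp [pyAt]
  have hendv : pyAt (x :: xs) (-1) = y := by
    rw [pyAt, PySem.List.pyGet?_neg_one, ← List.head?_reverse, hrev]; rfl
  -- A's left readings = the interior of the list
  have hmapF : (PySem.List.pyRange 1 (N - 1) 1).map (fun i => pyAt (x :: xs) i)
      = xs.dropLast := by
    have hstep : ∀ i ∈ PySem.List.pyRange 1 (N - 1) 1,
        pyAt (x :: xs) i = PySem.List.pyGetD (x :: xs).dropLast i 0 := by
      intro i hi
      rw [PySem.List.mem_pyRange_one] at hi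
      obtain ⟨j, rfl⟩ : ∃ j : Nat, i = (j : Int) := ⟨i.toNat, (Int.toNat_of_nonneg (by omega)).symm⟩
      have hj : j < (x :: xs).dropLast.length := by
        rw [List.length_dropLast]
        omega
      have hj2 : j < (x :: xs).length := by simp at hj ⊢; omega
      rw [pyAt_nat]
      simp [List.getElem?_eq_getElem hj2, List.getElem?_eq_getElem hj,
        List.getD, List.getElem_dropLast]
    rw [List.map_congr_left hstep]
    have hb : N - 1 = (((x :: xs).dropLast.length : Nat) : Int) := by
      rw [List.length_dropLast]; omega
    rw [hb, PySem.List.map_pyGetD_pyRange' (x :: xs).dropLast 0 (by norm_num)]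
    simpa using dropLast_cons_drop_one x xs (xs.length - 1) (by omega)
  -- A's right readings = the interior of the reversed list
  have hmapG : (PySem.List.pyRange 1 (N - 1) 1).map (fun i => pyAt (x :: xs) (-1 - i))
      = ys.dropLast := by
    have hstep : ∀ i ∈ PySem.List.pyRange 1 (N - 1) 1,
        pyAt (x :: xs) (-1 - i) = PySem.List.pyGetD (x :: xs).reverse.dropLast i 0 := by
      intro i hi
      rw [PySem.List.mem_pyRange_one] at hi
      rw [pyAt_negIdx (x :: xs) i (by omega) (by omega)]
      obtain ⟨j, rfl⟩ : ∃ j : Nat, i = (j : Int) := ⟨i.toNat, (Int.toNat_of_nonneg (by omega)).symm⟩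
      have hj : j < (x :: xs).reverse.dropLast.length := by
        rw [List.length_dropLast, List.length_reverse]
        omega
      have hj2 : j < (x :: xs).reverse.length := by simp at hj ⊢; omega
      rw [pyAt_nat]
      have hjr : j < xs.reverse.length := by simp; omega
      simp [List.getD, List.getElem?_append_left hjr]
    rw [List.map_congr_left hstep]
    have hb : N - 1 = (((x :: xs).reverse.dropLast.length : Nat) : Int) := by
      rw [List.length_dropLast, List.length_reverse]; omega
    rw [hb, PySem.List.map_pyGetD_pyRange' (x :: xs).reverse.dropLast 0 (by norm_num)]
    rw [hrev]
    simpa using dropLast_cons_drop_one y ys (ys.length - 1) (by omega)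
  -- B's left scan
  have hleftB : (PySem.List.pyRange 1 (N - 1) 1).foldl
      (fun c i => c + (if pyAt (preMins (x :: xs)) i < pyAt (preMins (x :: xs)) (i - 1) then 1 else 0)) 0
      = dropCount x xs.dropLast := by
    rw [preMins_cons]
    have hb : N - 1 = 1 + ((xs.length - 1 : Nat) : Int) := by omega
    rw [hb, countFold x xs (xs.length - 1) (by omega), ← List.dropLast_eq_take]
  -- B's right scan, reflected onto the reversed table
  have hrp : preMins (x :: xs).reverse = y :: pmAux y ys := by rw [hrev, preMins_cons]
  have hrplen : (y :: pmAux y ys).length = ys.length + 1 := by simp [pmAux_length]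
  have hRfold : (PySem.List.pyRange 1 (N - 1) 1).foldl
      (fun c i => c + (if pyAt (y :: pmAux y ys) i < pyAt (y :: pmAux y ys) (i - 1) then 1 else 0)) 0
      = dropCount y ys.dropLast := by
    have hb : N - 1 = 1 + ((ys.length - 1 : Nat) : Int) := by omega
    rw [hb, countFold y ys (ys.length - 1) (by omega), ← List.dropLast_eq_take]
  have hrightB : (PySem.List.pyRange 1 (N - 1) 1).foldl
      (fun c i => c + (if pyAt ((preMins (x :: xs).reverse).reverse) i
          < pyAt ((preMins (x :: xs).reverse).reverse) (i + 1) then 1 else 0)) 0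
      = dropCount y ys.dropLast := by
    rw [hrp, ← hRfold]
    rw [PySem.List.foldl_add, PySem.List.foldl_add]
    congr 1
    rw [PySem.List.pyRange_one 1 (N - 1), List.map_map, List.map_map]
    apply sum_reflect
    intro k hk
    have hM : (N - 1 - 1).toNat = ys.length - 1 := by omega
    rw [hM] at hk
    simp only [Function.comp]
    have h1 : pyAt (y :: pmAux y ys).reverse (1 + (k : Int))
        = pyAt (y :: pmAux y ys) ((ys.length : Int) - 1 - k) := by
      rw [pyAt_reverse _ _ (by omega) (by rw [hrplen]; push_cast; omega)]
      congr 1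
      rw [hrplen]; push_cast; ring
    have h2 : pyAt (y :: pmAux y ys).reverse (1 + (k : Int) + 1)
        = pyAt (y :: pmAux y ys) ((ys.length : Int) - 2 - k) := by
      rw [pyAt_reverse _ _ (by omega) (by rw [hrplen]; push_cast; omega)]
      congr 1
      rw [hrplen]; push_cast; ring
    have hcast : (1 : Int) + ((((N - 1 - 1).toNat) - 1 - k : Nat) : Int) = (ys.length : Int) - 1 - k := by
      omega
    rw [h1, h2]
    simp only [hcast]
    have h4 : ((ys.length : Int) - 1 - (k : Int) - 1) = (ys.length : Int) - 2 - (k : Int) := by ring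
    simp only [h4]
  -- the endpoint terms
  have hpreEnd : pyAt (preMins (x :: xs)) (N - 2) = runMin x xs.dropLast := by
    rw [preMins_cons]
    have hb : N - 2 = ((xs.length - 1 : Nat) : Int) := by omega
    rw [hb, pyAt_nat, pmIdx xs x (xs.length - 1) (by omega), ← List.dropLast_eq_take]
    rfl
  have hsufEnd : pyAt ((preMins (x :: xs).reverse).reverse) 1 = runMin y ys.dropLast := by
    rw [hrp]
    have h1 : pyAt (y :: pmAux y ys).reverse 1 = pyAt (y :: pmAux y ys)
        (((y :: pmAux y ys).length : Int) - 1 - 1) :=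
      pyAt_reverse _ 1 (by norm_num) (by rw [hrplen]; push_cast; omega)
    rw [h1]
    have hb : ((y :: pmAux y ys).length : Int) - 1 - 1 = ((ys.length - 1 : Nat) : Int) := by
      rw [hrplen]; omega
    rw [hb, pyAt_nat, pmIdx ys y (ys.length - 1) (by omega), ← List.dropLast_eq_take]
    rfl
  -- assemble
  rw [hstart, hendv,
    foldA_eq (fun i => pyAt (x :: xs) i) (fun i => pyAt (x :: xs) (-1 - i)) _ 0 x y,
    hmapF, hmapG, hleftB, hrightB, hpreEnd, hsufEnd]
  split_ifs <;> ring

-- ===== VERDICT (by name: the statement is the Claim_ definition above) =====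
theorem solution_spec : Claim_equal_solution := by
  intro a _
  unfold Spec_solution
  by_cases h : a.length ≤ 2
  · simp only [solution, solution_alt, if_pos h]
  · exact solution_eq_alt a (by omega)
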